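-- pv_equiv track=rewrite | github.com/brianmcmanus2000/illinois | disjoint.py | can_partition_disjoint_subsequences
-- ===== SOURCE A (Python) =====
-- def can_partition_disjoint_subsequences(P, T):
--     k = len(P)
--     n = len(T)
--
--     # Step 1: Build DP1 - Forward DP to match prefix of P
--     DP1 = [[False] * (k + 1) for _ in range(n + 1)]
--     DP1[0][0] = True  # Empty pattern can match with empty text
--
--     for i in range(1, n + 1):
--         DP1[i][0] = True  # Empty pattern matches with any text prefix
--         for j in range(1, k + 1):
--             DP1[i][j] = DP1[i - 1][j]  # Skip T[i-1]
--             if T[i - 1] == P[j - 1]: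
--                 DP1[i][j] = DP1[i][j] or DP1[i - 1][j - 1]  # Use T[i-1] to match P[j-1]
--
--     # Step 2: Build DP2 - Backward DP to match suffix of P
--     DP2 = [[False] * (k + 1) for _ in range(n + 1)]
--     DP2[n][0] = True  # Empty pattern can match with empty text
--
--     for i in range(n - 1, -1, -1):
--         DP2[i][0] = True  # Empty pattern matches with any text suffix
--         for j in range(1, k + 1):
--             DP2[i][j] = DP2[i + 1][j]  # Skip T[i]
--             if T[i] == P[k - j]:  # Match with reverse of P
--                 DP2[i][j] = DP2[i][j] or DP2[i + 1][j - 1]  # Use T[i] to match P[k-j]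
--
--     # Step 3: Check for disjoint subsequences
--     for i in range(n):
--         for j in range(k):
--             if DP1[i][j] and DP2[i + 1][k - j]:
--                 return True
--
--     return False
-- ===== SOURCE B (Python) =====
-- def can_partition_disjoint_subsequences(P, T):
--     # Greedy O(n+k): f[i] = longest prefix of P that is a subsequence of T[:i],
--     # g[d] = longest suffix of P that is a subsequence of T[n-d:].
--     # A split exists iff some position i<n has g[n-1-i] >= 1 and f[i] + g[n-1-i] >= k.
--     k, n = len(P), len(T)
--     f = [0] * (n + 1)
--     for i in range(n):
--         f[i + 1] = f[i] + 1 if f[i] < k and T[i] == P[f[i]] else f[i]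
--     g = [0] * (n + 1)
--     for d in range(n):
--         g[d + 1] = g[d] + 1 if g[d] < k and T[n - 1 - d] == P[k - 1 - g[d]] else g[d]
--     for i in range(n):
--         gi = g[n - 1 - i]
--         if gi >= 1 and f[i] + gi >= k:
--             return True
--     return False
-- ===== Notes on version B (the rewrite author's own statement) =====
-- stated objective: faster
-- what changed: Replaced the two O(n*k) 2D subsequence DP tables and the O(n*k) final scan by two O(n) greedy frontier arrays (longest prefix of P embeddable in T[:i], longest suffix embeddable in T[i:]) and a single O(n) check f[i]+g[n-1-i]>=k with g>=1.
import Mathlib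
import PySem

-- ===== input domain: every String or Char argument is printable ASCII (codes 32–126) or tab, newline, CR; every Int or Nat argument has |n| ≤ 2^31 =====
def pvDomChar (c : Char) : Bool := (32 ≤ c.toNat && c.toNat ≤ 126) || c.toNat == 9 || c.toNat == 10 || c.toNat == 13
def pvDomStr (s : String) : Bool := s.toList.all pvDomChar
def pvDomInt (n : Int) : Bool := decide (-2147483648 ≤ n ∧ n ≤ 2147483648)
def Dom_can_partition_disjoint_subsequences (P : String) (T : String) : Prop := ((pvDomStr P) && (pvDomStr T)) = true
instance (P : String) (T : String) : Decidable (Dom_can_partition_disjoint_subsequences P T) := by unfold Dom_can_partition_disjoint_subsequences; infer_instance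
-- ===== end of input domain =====

-- B replaces A's two O(n*k) DP tables by two O(n) greedy frontier arrays (faster, asymptotic).

-- ===== PORT A =====
-- row i of Python's DP1 (DP1[i][j] reads only row i-1, so the table is built row by row);
-- row 0 is [True] ++ k*[False] after the DP1[0][0] = True assignment.
def pvRowA1 (Pl Tl : List Char) : Nat → List Bool
  | 0 => true :: List.replicate Pl.length false
  | i+1 =>
    let prev := pvRowA1 Pl Tl i
    true :: (List.range Pl.length).map (fun j0 =>
      let s := prev.getD (j0+1) false
      if Tl.getD i ' ' = Pl.getD j0 ' ' then s || prev.getD j0 false else s)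

-- row n-d of Python's DP2 (built backwards from row n, which is [True] ++ k*[False])
def pvRowA2 (Pl Tl : List Char) : Nat → List Bool
  | 0 => true :: List.replicate Pl.length false
  | d+1 =>
    let prev := pvRowA2 Pl Tl d
    true :: (List.range Pl.length).map (fun j0 =>
      let s := prev.getD (j0+1) false
      if Tl.getD (Tl.length - 1 - d) ' ' = Pl.getD (Pl.length - 1 - j0) ' ' then s || prev.getD j0 false else s)

def can_partition_disjoint_subsequences (P : String) (T : String) : Bool :=
  let Pl := P.toList
  let Tl := T.toList
  let k := Pl.length
  let n := Tl.length
  (List.range n).any fun i =>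
    (List.range k).any fun j =>
      (pvRowA1 Pl Tl i).getD j false && (pvRowA2 Pl Tl (n - (i+1))).getD (k - j) false

-- ===== PORT B =====
-- f[i] of Source B: greedy count of prefix chars of P matched in T[:i]
def pvGreedyF (Pl Tl : List Char) : Nat → Nat
  | 0 => 0
  | i+1 =>
    let c := pvGreedyF Pl Tl i
    if decide (c < Pl.length) && (Tl.getD i ' ' == Pl.getD c ' ') then c+1 else c

-- g[d] of Source B: greedy count of suffix chars of P matched in T[n-d:]
def pvGreedyG (Pl Tl : List Char) : Nat → Nat
  | 0 => 0
  | d+1 =>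
    let c := pvGreedyG Pl Tl d
    if decide (c < Pl.length) && (Tl.getD (Tl.length - 1 - d) ' ' == Pl.getD (Pl.length - 1 - c) ' ') then c+1 else c

def can_partition_disjoint_subsequences_alt (P : String) (T : String) : Bool :=
  let Pl := P.toList
  let Tl := T.toList
  let k := Pl.length
  let n := Tl.length
  (List.range n).any fun i =>
    let gi := pvGreedyG Pl Tl (n - 1 - i)
    decide (1 ≤ gi) && decide (k ≤ pvGreedyF Pl Tl i + gi)

-- ===== PRECONDITION & SPEC =====
def Spec_can_partition_disjoint_subsequences (P : String) (T : String) (out : Bool) : Prop := out = can_partition_disjoint_subsequences_alt P T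
instance (P : String) (T : String) (out : Bool) : Decidable (Spec_can_partition_disjoint_subsequences P T out) := by unfold Spec_can_partition_disjoint_subsequences; infer_instance

-- ===== CLAIM (what is proved, stated in full; the proofs are below) =====
def Claim_equal_can_partition_disjoint_subsequences : Prop := ∀ (P : String) (T : String), Dom_can_partition_disjoint_subsequences P T → Spec_can_partition_disjoint_subsequences P T (can_partition_disjoint_subsequences P T)

-- ===== LEMMAS AND PROOFS =====

theorem pvGreedyG_le (Pl Tl : List Char) (d : Nat) : pvGreedyG Pl Tl d ≤ Pl.length := by
  induction d with
  | zero => simp [pvGreedyG]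
  | succ d ih =>
    simp only [pvGreedyG]
    split
    · next h =>
      simp only [Bool.and_eq_true, decide_eq_true_eq] at h
      omega
    · exact ih

theorem getD_map_range {α : Type} (h : Nat → α) (k j0 : Nat) (d : α) (hj : j0 < k) :
    ((List.range k).map h).getD j0 d = h j0 := by
  rw [List.getD_eq_getElem?_getD]
  simp [hj]

theorem pvRowA1_getD (Pl Tl : List Char) (i : Nat) :
    ∀ j, j ≤ Pl.length → (pvRowA1 Pl Tl i).getD j false = decide (j ≤ pvGreedyF Pl Tl i) := by
  induction i with
  | zero =>
    intro j hj
    match j with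
    | 0 => simp [pvRowA1, pvGreedyF]
    | j0+1 =>
      simp only [pvRowA1, pvGreedyF, List.getD_cons_succ]
      rw [List.getD_eq_getElem?_getD]
      simp
  | succ i ih =>
    intro j hj
    match j with
    | 0 => simp [pvRowA1, pvGreedyF]
    | j0+1 =>
      have hj0 : j0 < Pl.length := by omega
      simp only [pvRowA1, List.getD_cons_succ]
      rw [getD_map_range _ _ _ _ hj0]
      rw [ih (j0+1) hj, ih j0 (by omega)]
      have hstep : pvGreedyF Pl Tl (i+1) =
          if decide (pvGreedyF Pl Tl i < Pl.length) && (Tl.getD i ' ' == Pl.getD (pvGreedyF Pl Tl i) ' ') then pvGreedyF Pl Tl i + 1 else pvGreedyF Pl Tl i := rfl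
      rw [hstep]
      set c := pvGreedyF Pl Tl i with hc
      rcases eq_or_ne j0 c with heq | hne
      · subst heq
        split_ifs with he hg hg
        · apply Bool.eq_iff_iff.mpr
          simp only [Bool.or_eq_true, decide_eq_true_eq]
          omega
        · simp only [Bool.and_eq_true, decide_eq_true_eq, beq_iff_eq, not_and] at hg
          exact absurd he (hg hj0)
        · simp only [Bool.and_eq_true, decide_eq_true_eq, beq_iff_eq] at hg
          exact absurd hg.2 he
        · rfl
      · split_ifs with he hg hg <;>
          (apply Bool.eq_iff_iff.mpr; simp only [Bool.or_eq_true, decide_eq_true_eq]; try omega)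

theorem pvRowA2_getD (Pl Tl : List Char) (d : Nat) :
    ∀ j, j ≤ Pl.length → (pvRowA2 Pl Tl d).getD j false = decide (j ≤ pvGreedyG Pl Tl d) := by
  induction d with
  | zero =>
    intro j hj
    match j with
    | 0 => simp [pvRowA2, pvGreedyG]
    | j0+1 =>
      simp only [pvRowA2, pvGreedyG, List.getD_cons_succ]
      rw [List.getD_eq_getElem?_getD]
      simp
  | succ d ih =>
    intro j hj
    match j with
    | 0 => simp [pvRowA2, pvGreedyG]
    | j0+1 =>
      have hj0 : j0 < Pl.length := by omega
      simp only [pvRowA2, List.getD_cons_succ]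
      rw [getD_map_range _ _ _ _ hj0]
      rw [ih (j0+1) hj, ih j0 (by omega)]
      have hstep : pvGreedyG Pl Tl (d+1) =
          if decide (pvGreedyG Pl Tl d < Pl.length) && (Tl.getD (Tl.length - 1 - d) ' ' == Pl.getD (Pl.length - 1 - pvGreedyG Pl Tl d) ' ') then pvGreedyG Pl Tl d + 1 else pvGreedyG Pl Tl d := rfl
      rw [hstep]
      set c := pvGreedyG Pl Tl d with hc
      rcases eq_or_ne j0 c with heq | hne
      · subst heq
        split_ifs with he hg hg
        · apply Bool.eq_iff_iff.mpr
          simp only [Bool.or_eq_true, decide_eq_true_eq]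
          omega
        · simp only [Bool.and_eq_true, decide_eq_true_eq, beq_iff_eq, not_and] at hg
          exact absurd he (hg hj0)
        · simp only [Bool.and_eq_true, decide_eq_true_eq, beq_iff_eq] at hg
          exact absurd hg.2 he
        · rfl
      · split_ifs with he hg hg <;>
          (apply Bool.eq_iff_iff.mpr; simp only [Bool.or_eq_true, decide_eq_true_eq]; try omega)

theorem inner_any_eq (Pl Tl : List Char) (i : Nat) :
    ((List.range Pl.length).any fun j =>
      (pvRowA1 Pl Tl i).getD j false && (pvRowA2 Pl Tl (Tl.length - (i+1))).getD (Pl.length - j) false)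
    = (decide (1 ≤ pvGreedyG Pl Tl (Tl.length - 1 - i)) &&
       decide (Pl.length ≤ pvGreedyF Pl Tl i + pvGreedyG Pl Tl (Tl.length - 1 - i))) := by
  have hd : Tl.length - (i+1) = Tl.length - 1 - i := by omega
  rw [hd]
  set fi := pvGreedyF Pl Tl i with hf
  set gi := pvGreedyG Pl Tl (Tl.length - 1 - i) with hg
  have hgle : gi ≤ Pl.length := pvGreedyG_le Pl Tl _
  apply Bool.eq_iff_iff.mpr
  constructor
  · intro h
    rw [List.any_eq_true] at h
    obtain ⟨j, hj, hval⟩ := h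
    rw [List.mem_range] at hj
    rw [pvRowA1_getD Pl Tl i j (by omega), pvRowA2_getD Pl Tl _ (Pl.length - j) (by omega)] at hval
    simp only [Bool.and_eq_true, decide_eq_true_eq] at hval ⊢
    omega
  · intro h
    simp only [Bool.and_eq_true, decide_eq_true_eq] at h
    rw [List.any_eq_true]
    refine ⟨Pl.length - gi, ?_, ?_⟩
    · rw [List.mem_range]; omega
    · rw [pvRowA1_getD Pl Tl i _ (by omega), pvRowA2_getD Pl Tl _ _ (by omega)]
      simp only [Bool.and_eq_true, decide_eq_true_eq]
      omega

-- ===== VERDICT (by name: the statement is the Claim_ definition above) =====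
theorem can_partition_disjoint_subsequences_spec : Claim_equal_can_partition_disjoint_subsequences := by
  intro P T _
  unfold Spec_can_partition_disjoint_subsequences
  unfold can_partition_disjoint_subsequences can_partition_disjoint_subsequences_alt
  simp only []
  exact List.any_congr rfl (fun i => inner_any_eq P.toList T.toList i)
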